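-- pv_equiv track=rewrite | github.com/royadityak94/InterviewPrep | Grokking/Subsets/Practice/all_permutations_duplicate.py | find_subsets_alternate
-- ===== SOURCE A (Python) =====
-- def find_subsets_alternate(arr):
--     subsets = [[]]
--     for ele in arr:
--         startIdx, endIdx = 0, len(subsets)
--         for j in range(startIdx, endIdx):
--             pair = subsets[j] + [ele]
--             if pair not in subsets:
--                 subsets += pair,
--     return subsets
-- ===== SOURCE B (Python) =====
-- def find_subsets_alternate(arr):
--     result = []
--     seen = set()
--     for i in range(2 ** len(arr)):
--         subset = []
--         bits = i
--         for ele in arr: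
--             if bits % 2 == 1:
--                 subset.append(ele)
--             bits //= 2
--         key = tuple(subset)
--         if key not in seen:
--             seen.add(key)
--             result.append(subset)
--     return result
-- ===== Notes on version B (the rewrite author's own statement) =====
-- stated objective: faster
-- what changed: Replaces A's iterative doubling (whose duplicate check scans the whole growing subset list) by direct bitmask enumeration of all 2^n candidate subsets deduplicated through a hash set of tuples, keeping the same first-occurrence binary-counting order; intended as faster — a timing run saw A time out at n=16 where B returned, but could not confirm a ratio.
import Mathlib
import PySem

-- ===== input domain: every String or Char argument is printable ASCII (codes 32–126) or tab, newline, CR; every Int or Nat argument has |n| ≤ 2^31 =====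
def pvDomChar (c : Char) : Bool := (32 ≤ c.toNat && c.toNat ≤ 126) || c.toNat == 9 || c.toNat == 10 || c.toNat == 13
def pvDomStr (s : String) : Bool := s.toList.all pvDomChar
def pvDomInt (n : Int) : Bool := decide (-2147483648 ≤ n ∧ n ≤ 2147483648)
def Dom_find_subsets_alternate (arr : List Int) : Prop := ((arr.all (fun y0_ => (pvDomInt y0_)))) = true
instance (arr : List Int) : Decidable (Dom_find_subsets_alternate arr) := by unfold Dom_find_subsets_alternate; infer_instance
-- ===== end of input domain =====

-- B replaces A's iterative doubling (linear membership scan of the subset list per candidate) by bitmask enumeration deduplicated through a set; intended as faster (a timing run saw A time out at n=16 where B returned, but could not confirm a ratio).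

-- ===== PORT A =====
-- subsets[j] is always in range (0 <= j < endIdx <= len(subsets)); pyGetD's default [] is never used.
def find_subsets_alternate (arr : List Int) : List (List Int) :=
  arr.foldl (fun subsets ele =>
    (PySem.List.pyRange 0 (subsets.length : Int) 1).foldl
      (fun s j =>
        let pair := PySem.List.pyGetD s j [] ++ [ele]
        if pair ∈ s then s else s ++ [pair])
      subsets)
    [[]]

-- ===== PORT B =====
-- the inner loop of Source B: the subset of `arr` selected by the low bits of i
def bSubset (arr : List Int) (i : Int) : List Int :=
  (arr.foldl (fun (st : List Int × Int) ele =>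
      ((if PySem.Int.mod st.2 2 = 1 then st.1 ++ [ele] else st.1), PySem.Int.floordiv st.2 2))
    ([], i)).1

def find_subsets_alternate_alt (arr : List Int) : List (List Int) :=
  ((PySem.List.pyRange 0 ((2 ^ arr.length : Nat) : Int) 1).foldl
    (fun (st : List (List Int) × PySem.Set (List Int)) i =>
      let subset := bSubset arr i
      if subset ∈ st.2 then st else (st.1 ++ [subset], PySem.Set.add st.2 subset))
    ([], PySem.Set.empty)).1

-- ===== PRECONDITION & SPEC =====
def Spec_find_subsets_alternate (arr : List Int) (out : List (List Int)) : Prop := out = find_subsets_alternate_alt arr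
instance (arr : List Int) (out : List (List Int)) : Decidable (Spec_find_subsets_alternate arr out) := by unfold Spec_find_subsets_alternate; infer_instance

-- ===== CLAIM (what is proved, stated in full; the proofs are below) =====
def Claim_equal_find_subsets_alternate : Prop := ∀ (arr : List Int), Dom_find_subsets_alternate arr → Spec_find_subsets_alternate arr (find_subsets_alternate arr)

-- ===== LEMMAS AND PROOFS =====

-- mathematical form of bSubset on a natural mask
def nSub (arr : List Int) (i : Nat) : List Int :=
  match arr with
  | [] => []
  | a :: t => (if i % 2 = 1 then [a] else []) ++ nSub t (i / 2)

-- all mask-subsets of arr, in binary-counting order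
def msk (arr : List Int) : List (List Int) :=
  (List.range (2 ^ arr.length)).map (nSub arr)

-- first-occurrence dedup appended to an accumulator
def ded (acc : List (List Int)) : List (List Int) → List (List Int)
  | [] => acc
  | x :: L => if x ∈ acc then ded acc L else ded (acc ++ [x]) L

-- the NEW elements ded appends
def dnew (B : List (List Int)) : List (List Int) → List (List Int)
  | [] => []
  | x :: L => if x ∈ B then dnew B L else x :: dnew (B ++ [x]) L

theorem ded_eq (B L : List (List Int)) : ded B L = B ++ dnew B L := by
  induction L generalizing B with
  | nil => simp [ded, dnew]
  | cons x L ih =>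
    simp only [ded, dnew]
    split_ifs with h
    · exact ih B
    · rw [ih (B ++ [x])]; simp

theorem ded_append (acc L1 L2 : List (List Int)) :
    ded acc (L1 ++ L2) = ded (ded acc L1) L2 := by
  induction L1 generalizing acc with
  | nil => simp [ded]
  | cons x L ih => simp only [List.cons_append, ded]; split_ifs <;> exact ih _

-- key dedup lemma: deduplicating the images of the already-deduplicated list equals
-- deduplicating the images of the original list
theorem ded_map_dnew (f : List Int → List Int) (L : List (List Int)) :
    ∀ (B acc : List (List Int)), (∀ x ∈ B, f x ∈ acc) →
      ded acc ((dnew B L).map f) = ded acc (L.map f) := by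
  induction L with
  | nil => intro B acc _; rfl
  | cons x L ih =>
    intro B acc hB
    simp only [dnew, List.map_cons]
    split_ifs with hx
    · rw [ih B acc hB]
      have hfx : f x ∈ acc := hB x hx
      simp [ded, hfx]
    · simp only [List.map_cons, ded]
      split_ifs with hfx
      · rw [ih (B ++ [x]) acc]
        intro y hy
        rcases List.mem_append.1 hy with h | h
        · exact hB y h
        · simp only [List.mem_singleton] at h; subst h; exact hfx
      · rw [ih (B ++ [x]) (acc ++ [f x])]
        intro y hy
        rcases List.mem_append.1 hy with h | h
        · exact List.mem_append_left _ (hB y h)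
        · simp only [List.mem_singleton] at h; subst h; simp

-- bSubset's fold, characterised
theorem bfold (arr : List Int) : ∀ (acc : List Int) (i : Nat),
    arr.foldl (fun (st : List Int × Int) ele =>
      ((if PySem.Int.mod st.2 2 = 1 then st.1 ++ [ele] else st.1), PySem.Int.floordiv st.2 2))
      (acc, (i : Int))
    = (acc ++ nSub arr i, ((i / 2 ^ arr.length : Nat) : Int)) := by
  induction arr with
  | nil => intro acc i; simp [nSub]
  | cons a t ih =>
    intro acc i
    have hm : PySem.Int.mod (i : Int) 2 = ((i % 2 : Nat) : Int) := by
      exact_mod_cast PySem.Int.mod_natCast i 2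
    have hd : PySem.Int.floordiv (i : Int) 2 = ((i / 2 : Nat) : Int) := by
      exact_mod_cast PySem.Int.floordiv_natCast i 2
    simp only [List.foldl_cons, hm, hd]
    by_cases h2 : i % 2 = 1
    · have h2' : ((i % 2 : Nat) : Int) = 1 := by rw [h2]; rfl
      rw [if_pos h2', ih (acc ++ [a]) (i / 2)]
      simp [nSub, h2, Nat.div_div_eq_div_mul, Nat.pow_succ, Nat.mul_comm]
    · have h2' : ¬ ((i % 2 : Nat) : Int) = 1 := by
        intro h; exact h2 (by exact_mod_cast h)
      rw [if_neg h2', ih acc (i / 2)]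
      simp [nSub, h2, Nat.div_div_eq_div_mul, Nat.pow_succ, Nat.mul_comm]

theorem bSubset_eq (arr : List Int) (i : Nat) : bSubset arr (i : Int) = nSub arr i := by
  unfold bSubset; rw [bfold arr [] i]; simp

-- nSub only looks at the low bits
theorem nSub_add_pow (arr : List Int) : ∀ (i k : Nat),
    nSub arr (i + 2 ^ arr.length * k) = nSub arr i := by
  induction arr with
  | nil => intro i k; rfl
  | cons a t ih =>
    intro i k
    have hp : (2 : Nat) ^ (a :: t).length = 2 * 2 ^ t.length := by
      simp [List.length_cons, Nat.pow_succ, Nat.mul_comm]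
    simp only [nSub, hp]
    have he : i + 2 * 2 ^ t.length * k = i + 2 * (2 ^ t.length * k) := by ring
    have h1 : (i + 2 * 2 ^ t.length * k) % 2 = i % 2 := by rw [he]; omega
    have h2 : (i + 2 * 2 ^ t.length * k) / 2 = i / 2 + 2 ^ t.length * k := by rw [he]; omega
    rw [h1, h2, ih]

theorem nSub_snoc (e : Int) (p : List Int) : ∀ (i : Nat),
    nSub (p ++ [e]) i = nSub p i ++ (if (i / 2 ^ p.length) % 2 = 1 then [e] else []) := by
  induction p with
  | nil => intro i; simp [nSub]
  | cons a t ih =>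
    intro i
    simp only [List.cons_append, nSub, ih (i / 2), List.length_cons]
    have hc : i / 2 / 2 ^ t.length = i / 2 ^ (t.length + 1) := by
      rw [Nat.div_div_eq_div_mul, Nat.mul_comm 2 (2 ^ t.length), ← Nat.pow_succ]
    simp only [hc, List.append_assoc]
    rfl

theorem msk_snoc (p : List Int) (e : Int) :
    msk (p ++ [e]) = msk p ++ (msk p).map (· ++ [e]) := by
  unfold msk
  have hl : (p ++ [e]).length = p.length + 1 := by simp
  rw [hl]
  have hr : (2 : Nat) ^ (p.length + 1) = 2 ^ p.length + 2 ^ p.length := by ring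
  rw [hr, List.range_add, List.map_append, List.map_map, List.map_map]
  congr 1
  · apply List.map_congr_left
    intro i hi
    have hi' : i < 2 ^ p.length := List.mem_range.1 hi
    rw [nSub_snoc]
    have h0 : i / 2 ^ p.length = 0 := Nat.div_eq_of_lt hi'
    simp [h0]
  · apply List.map_congr_left
    intro i hi
    have hi' : i < 2 ^ p.length := List.mem_range.1 hi
    simp only [Function.comp]
    rw [nSub_snoc]
    have hpos : 0 < (2 : Nat) ^ p.length := Nat.pow_pos (by norm_num)
    have h1 : (2 ^ p.length + i) / 2 ^ p.length = 1 := by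
      rw [Nat.add_comm, Nat.add_div_right _ hpos, Nat.div_eq_of_lt hi']
    have h2 : nSub p (2 ^ p.length + i) = nSub p i := by
      rw [Nat.add_comm, show (2:Nat) ^ p.length = 2 ^ p.length * 1 by ring, nSub_add_pow]
    rw [h1, h2]
    simp

-- A's inner loop over the current subset list D is dedup of D's images against D
theorem innerA_aux (e : Int) (D : List (List Int)) (rest : List (List Int)) :
    ∀ (pre : List (List Int)), pre ++ rest = D →
    (PySem.List.pyRange (pre.length : Int) (D.length : Int) 1).foldl
      (fun s j =>
        let pair := PySem.List.pyGetD s j [] ++ [e]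
        if pair ∈ s then s else s ++ [pair])
      (ded D (pre.map (· ++ [e])))
    = ded D (D.map (· ++ [e])) := by
  induction rest with
  | nil =>
    intro pre hpre
    rw [List.append_nil] at hpre
    subst hpre
    rw [PySem.List.pyRange_one_eq_nil (le_refl _)]
    rfl
  | cons x rest ih =>
    intro pre hpre
    have hlen : D.length = pre.length + rest.length + 1 := by
      rw [← hpre]; simp; omega
    have hlt : (pre.length : Int) < (D.length : Int) := by
      exact_mod_cast (by omega : pre.length < D.length)
    rw [PySem.List.pyRange_one_cons hlt, List.foldl_cons]
    have hsplit : ded D (pre.map (· ++ [e]))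
        = pre ++ x :: (rest ++ dnew D (pre.map (· ++ [e]))) := by
      rw [ded_eq, ← hpre, List.append_assoc, List.cons_append]
    have hget : PySem.List.pyGetD (ded D (pre.map (· ++ [e]))) (pre.length : Int) [] = x := by
      rw [hsplit, PySem.List.pyGetD_natCast]
      simp [List.getD]
    have hstep :
        (if PySem.List.pyGetD (ded D (pre.map (· ++ [e]))) (pre.length : Int) [] ++ [e]
              ∈ ded D (pre.map (· ++ [e]))
         then ded D (pre.map (· ++ [e]))
         else ded D (pre.map (· ++ [e])) ++ [PySem.List.pyGetD (ded D (pre.map (· ++ [e]))) (pre.length : Int) [] ++ [e]])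
        = ded D ((pre ++ [x]).map (· ++ [e])) := by
      rw [hget, List.map_append, ded_append]
      simp [ded]
    have hcast : (pre.length : Int) + 1 = ((pre ++ [x]).length : Int) := by
      simp
    calc (PySem.List.pyRange ((pre.length : Int) + 1) (D.length : Int) 1).foldl
          (fun s j =>
            let pair := PySem.List.pyGetD s j [] ++ [e]
            if pair ∈ s then s else s ++ [pair])
          (if PySem.List.pyGetD (ded D (pre.map (· ++ [e]))) (pre.length : Int) [] ++ [e]
                ∈ ded D (pre.map (· ++ [e]))
           then ded D (pre.map (· ++ [e]))
           else ded D (pre.map (· ++ [e])) ++ [PySem.List.pyGetD (ded D (pre.map (· ++ [e]))) (pre.length : Int) [] ++ [e]])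
        = (PySem.List.pyRange (((pre ++ [x]).length : Int)) (D.length : Int) 1).foldl
          (fun s j =>
            let pair := PySem.List.pyGetD s j [] ++ [e]
            if pair ∈ s then s else s ++ [pair])
          (ded D ((pre ++ [x]).map (· ++ [e]))) := by rw [hstep, hcast]
      _ = ded D (D.map (· ++ [e])) := ih (pre ++ [x]) (by rw [← hpre]; simp)

theorem innerA (e : Int) (D : List (List Int)) :
    (PySem.List.pyRange 0 (D.length : Int) 1).foldl
      (fun s j =>
        let pair := PySem.List.pyGetD s j [] ++ [e]
        if pair ∈ s then s else s ++ [pair]) D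
    = ded D (D.map (· ++ [e])) := by
  have := innerA_aux e D D [] rfl
  simpa [ded] using this

theorem A_aux : ∀ (l p : List Int),
    l.foldl (fun subsets ele =>
      (PySem.List.pyRange 0 (subsets.length : Int) 1).foldl
        (fun s j =>
          let pair := PySem.List.pyGetD s j [] ++ [ele]
          if pair ∈ s then s else s ++ [pair])
        subsets)
      (ded [] (msk p))
    = ded [] (msk (p ++ l)) := by
  intro l
  induction l with
  | nil => intro p; rw [List.append_nil]; rfl
  | cons e l ih =>
    intro p
    rw [List.foldl_cons, innerA e (ded [] (msk p))]
    have hD : ded [] (msk p) = dnew [] (msk p) := by rw [ded_eq]; simp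
    have hstep : ded (ded [] (msk p)) ((ded [] (msk p)).map (· ++ [e]))
        = ded [] (msk (p ++ [e])) := by
      rw [msk_snoc, ded_append, hD]
      exact ded_map_dnew (· ++ [e]) (msk p) [] (dnew [] (msk p))
        (by intro x hx; simp at hx)
    rw [hstep, ih (p ++ [e]), List.append_assoc]
    rfl

theorem A_eq_ded (arr : List Int) : find_subsets_alternate arr = ded [] (msk arr) := by
  have h0 : ded [] (msk ([] : List Int)) = [[]] := by
    simp [msk, nSub, ded]
  unfold find_subsets_alternate
  rw [← h0, A_aux arr []]
  rfl

theorem B_aux (arr : List Int) : ∀ (M : List Nat) (res : List (List Int)),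
    ((M.map (Nat.cast : Nat → Int)).foldl
      (fun (st : List (List Int) × PySem.Set (List Int)) i =>
        let subset := bSubset arr i
        if subset ∈ st.2 then st else (st.1 ++ [subset], PySem.Set.add st.2 subset))
      (res, res)).1
    = ded res (M.map (nSub arr)) := by
  intro M
  induction M with
  | nil => intro res; rfl
  | cons i M ih =>
    intro res
    simp only [List.map_cons, List.foldl_cons]
    rw [bSubset_eq]
    by_cases h : nSub arr i ∈ res
    · rw [if_pos h]
      simp only [ded, if_pos h]
      exact ih res
    · rw [if_neg h, PySem.Set.add_of_not_mem h]
      simp only [ded, if_neg h]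
      exact ih (res ++ [nSub arr i])

theorem B_eq_ded (arr : List Int) : find_subsets_alternate_alt arr = ded [] (msk arr) := by
  unfold find_subsets_alternate_alt
  have hr : PySem.List.pyRange 0 ((2 ^ arr.length : Nat) : Int) 1
      = (List.range (2 ^ arr.length)).map (Nat.cast : Nat → Int) := by
    rw [PySem.List.pyRange_one]
    simp only [sub_zero, Int.toNat_natCast, zero_add]
  rw [hr]
  have : ([] : List (List Int)) = PySem.Set.empty := rfl
  rw [← this]
  exact B_aux arr (List.range (2 ^ arr.length)) []

-- ===== VERDICT (by name: the statement is the Claim_ definition above) =====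
theorem find_subsets_alternate_spec : Claim_equal_find_subsets_alternate := by
  intro arr _
  unfold Spec_find_subsets_alternate
  rw [A_eq_ded, B_eq_ded]
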